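-- pv_equiv track=rewrite | github.com/aneetdutta/pathleakage_privacy | code/services/general.py | group_identifiers
-- ===== SOURCE A (Python) =====
-- def group_identifiers(tuples_list):
--     uf = UnionFind()
--
--     for i, time_epoch, type_, identifiers, ta in tuples_list:
--         identifiers = list(identifiers)
--         for identifier in identifiers:
--             uf.add(identifier)
--         for i in range(1, len(identifiers)):
--             uf.union(identifiers[0], identifiers[i])
--
--     groups = {}
--     for identifier in uf.parent:
--         root = uf.find(identifier)
--         if root not in groups:
--             groups[root] = set()
--         groups[root].add(identifier)
--
--     return list(groups.values())
--
-- class UnionFind: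
--     def __init__(self):
--         self.parent = {}
--         self.rank = {}
--
--     def find(self, item):
--         if self.parent[item] != item:
--             self.parent[item] = self.find(self.parent[item])
--         return self.parent[item]
--
--     def union(self, item1, item2):
--         root1 = self.find(item1)
--         root2 = self.find(item2)
--
--         if root1 != root2:
--             if self.rank[root1] > self.rank[root2]:
--                 self.parent[root2] = root1
--             elif self.rank[root1] < self.rank[root2]:
--                 self.parent[root1] = root2
--             else:
--                 self.parent[root2] = root1
--                 self.rank[root1] += 1
--
--     def add(self, item):
--         if item not in self.parent:
--             self.parent[item] = item
--             self.rank[item] = 0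
-- ===== SOURCE B (Python) =====
-- def group_identifiers(tuples_list):
--     # components kept as a label map: each identifier -> representative label;
--     # a union relabels one class wholesale instead of maintaining a forest
--     label = {}
--     for i, time_epoch, type_, identifiers, ta in tuples_list:
--         identifiers = list(identifiers)
--         for x in identifiers:
--             if x not in label:
--                 label[x] = x
--         if identifiers:
--             a = label[identifiers[0]]
--             for y in identifiers[1:]:
--                 b = label[y]
--                 if b != a:
--                     label = {k: (a if v == b else v) for k, v in label.items()}
--     groups = {}
--     for x in label:
--         l = label[x]
--         if l not in groups:
--             groups[l] = set()
--         groups[l].add(x)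
--     return list(groups.values())
-- ===== Notes on version B (the rewrite author's own statement) =====
-- stated objective: simpler
-- what changed: B drops the UnionFind class entirely (no parent forest, no rank, no recursive find with path compression) and instead keeps a flat label map identifier->representative, merging two components by relabeling one class in a single dict comprehension; the final grouping then keys on labels instead of find() roots.
import Mathlib
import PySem

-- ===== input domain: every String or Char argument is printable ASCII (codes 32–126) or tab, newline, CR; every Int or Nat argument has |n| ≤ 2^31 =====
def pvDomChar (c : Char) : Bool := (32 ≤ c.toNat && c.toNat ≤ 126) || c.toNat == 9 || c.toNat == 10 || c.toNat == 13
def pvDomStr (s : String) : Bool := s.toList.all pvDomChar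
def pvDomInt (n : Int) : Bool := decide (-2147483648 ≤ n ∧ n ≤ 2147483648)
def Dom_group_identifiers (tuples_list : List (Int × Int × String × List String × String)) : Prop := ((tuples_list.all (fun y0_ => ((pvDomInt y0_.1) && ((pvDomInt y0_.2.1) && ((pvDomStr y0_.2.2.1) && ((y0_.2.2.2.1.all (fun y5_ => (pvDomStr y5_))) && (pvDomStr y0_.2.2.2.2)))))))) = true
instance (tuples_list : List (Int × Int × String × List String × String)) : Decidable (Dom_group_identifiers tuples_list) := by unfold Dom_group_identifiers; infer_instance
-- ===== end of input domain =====

-- ===== PORT A =====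
-- B replaces the UnionFind forest (find with path compression, union by rank) by a flat
-- label map that relabels a whole class on union: simpler code, same result incl. order.
-- find with fuel (guard only; Python recursion always terminates on reachable states)
def ufFind (fuel : Nat) (parent : PySem.Dict String String) (item : String) :
    Option (String × PySem.Dict String String) :=
  match fuel with
  | 0 => none
  | fuel + 1 =>
    match parent.get? item with
    | none => none
    | some p =>
      if p = item then some (item, parent)
      else
        match ufFind fuel parent p with
        | none => none
        | some (r, parent1) => some (r, parent1.insert item r)

def ufUnion (parent : PySem.Dict String String) (rank : PySem.Dict String Int)
    (item1 item2 : String) :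
    Option (PySem.Dict String String × PySem.Dict String Int) :=
  match ufFind (parent.size + 1) parent item1 with
  | none => none
  | some (root1, parent1) =>
    match ufFind (parent1.size + 1) parent1 item2 with
    | none => none
    | some (root2, parent2) =>
      if root1 ≠ root2 then
        match rank.get? root1, rank.get? root2 with
        | some k1, some k2 =>
          if k1 > k2 then some (parent2.insert root2 root1, rank)
          else if k1 < k2 then some (parent2.insert root1 root2, rank)
          else some (parent2.insert root2 root1, rank.insert root1 (k1 + 1))
        | _, _ => none
      else some (parent2, rank)

def ufAdd (parent : PySem.Dict String String) (rank : PySem.Dict String Int) (item : String) :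
    PySem.Dict String String × PySem.Dict String Int :=
  if parent.contains item then (parent, rank) else (parent.insert item item, rank.insert item 0)

def group_identifiers (tuples_list : List (Int × Int × String × List String × String)) :
    List (List String) :=
  let st : Option (PySem.Dict String String × PySem.Dict String Int) :=
    tuples_list.foldl (fun st t =>
      match st with
      | none => none
      | some (parent, rank) =>
        let identifiers := t.2.2.2.1
        let pr := identifiers.foldl (fun (pr : PySem.Dict String String × PySem.Dict String Int)
            identifier => ufAdd pr.1 pr.2 identifier) (parent, rank)
        (PySem.List.pyRange 1 (identifiers.length : Int) 1).foldl (fun st i =>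
          match st with
          | none => none
          | some (parent, rank) =>
            match PySem.List.pyGet? identifiers 0, PySem.List.pyGet? identifiers i with
            | some a, some b => ufUnion parent rank a b
            | _, _ => none) (some pr)) (some (PySem.Dict.empty, PySem.Dict.empty))
  match st with
  | none => []
  | some (parent, _rank) =>
    let gst := parent.keys.foldl (fun gst identifier =>
      match gst with
      | none => none
      | some st2 =>
        match ufFind (st2.1.size + 1) st2.1 identifier with
        | none => none
        | some (root, parent') =>
          let groups := if st2.2.contains root then st2.2
                        else st2.2.insert root PySem.Set.empty
          some (parent', groups.insert root
            (PySem.Set.add (groups.getD root PySem.Set.empty) identifier)))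
      (some (parent, (PySem.Dict.empty : PySem.Dict String (PySem.Set String))))
    match gst with
    | none => []
    | some (_, groups) => groups.values

-- ===== PORT B =====
def group_identifiers_alt (tuples_list : List (Int × Int × String × List String × String)) :
    List (List String) :=
  let label : PySem.Dict String String :=
    tuples_list.foldl (fun label t =>
      let identifiers := t.2.2.2.1
      let label := identifiers.foldl (fun lab x => if lab.contains x then lab else lab.insert x x) label
      match identifiers with
      | [] => label
      | x0 :: rest =>
        let a := label.getD x0 x0      -- label[identifiers[0]]; key is always present
        rest.foldl (fun lab y =>
          let b := lab.getD y y        -- label[y]; key is always present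
          if b ≠ a then
            PySem.Dict.mk (lab.items.map (fun kv => (kv.1, if kv.2 = b then a else kv.2)))
          else lab) label) PySem.Dict.empty
  let groups : PySem.Dict String (PySem.Set String) :=
    label.keys.foldl (fun groups x =>
      let l := label.getD x x          -- label[x]; key is always present
      let groups := if groups.contains l then groups else groups.insert l PySem.Set.empty
      groups.insert l (PySem.Set.add (groups.getD l PySem.Set.empty) x)) PySem.Dict.empty
  groups.values

-- ===== PRECONDITION & SPEC =====
def Spec_group_identifiers (tuples_list : List (Int × Int × String × List String × String)) (out : List (List String)) : Prop := out = group_identifiers_alt tuples_list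
instance (tuples_list : List (Int × Int × String × List String × String)) (out : List (List String)) : Decidable (Spec_group_identifiers tuples_list out) := by unfold Spec_group_identifiers; infer_instance

-- ===== CLAIM (what is proved, stated in full; the proofs are below) =====
def Claim_equal_group_identifiers : Prop := ∀ (tuples_list : List (Int × Int × String × List String × String)), Dom_group_identifiers tuples_list → Spec_group_identifiers tuples_list (group_identifiers tuples_list)

-- ===== LEMMAS AND PROOFS =====

-- ---------- generic list facts ----------
lemma filter_mono_aux {α : Type} (p q : α → Bool) :
    ∀ (l : List α), (∀ a ∈ l, p a = true → q a = true) →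
      (l.filter p).length ≤ (l.filter q).length := by
  intro l
  induction l with
  | nil => intro _; simp
  | cons x xs ih =>
    intro h
    have hx := h x (List.mem_cons_self ..)
    have ih' := ih (fun a ha => h a (List.mem_cons_of_mem _ ha))
    by_cases hp : p x = true
    · rw [List.filter_cons_of_pos hp, List.filter_cons_of_pos (hx hp)]
      simpa using ih'
    · rw [List.filter_cons_of_neg (by simpa using hp)]
      by_cases hq : q x = true
      · rw [List.filter_cons_of_pos hq]
        simp only [List.length_cons]
        omega
      · rw [List.filter_cons_of_neg (by simpa using hq)]
        exact ih'

lemma filter_lt_aux {α : Type} (p q : α → Bool) (a0 : α) :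
    ∀ (l : List α), (∀ a ∈ l, p a = true → q a = true) → a0 ∈ l → q a0 = true → p a0 = false →
      (l.filter p).length < (l.filter q).length := by
  intro l
  induction l with
  | nil => intro _ h; cases h
  | cons x xs ih =>
    intro himp hmem hq hp
    have himp' : ∀ a ∈ xs, p a = true → q a = true := fun a ha => himp a (List.mem_cons_of_mem _ ha)
    rcases List.mem_cons.mp hmem with h1 | h1
    · subst h1
      rw [List.filter_cons_of_neg (by simp [hp]), List.filter_cons_of_pos hq]
      have := filter_mono_aux p q xs himp'
      simp only [List.length_cons]
      omega
    · have ihs := ih himp' h1 hq hp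
      by_cases hpx : p x = true
      · rw [List.filter_cons_of_pos hpx, List.filter_cons_of_pos (himp x (List.mem_cons_self ..) hpx)]
        simp only [List.length_cons]
        omega
      · rw [List.filter_cons_of_neg (by simpa using hpx)]
        by_cases hqx : q x = true
        · rw [List.filter_cons_of_pos hqx]
          simp only [List.length_cons]
          omega
        · rw [List.filter_cons_of_neg (by simpa using hqx)]
          exact ihs

-- ---------- find roots ----------
def prootN : Nat → PySem.Dict String String → String → String
  | 0, _, x => x
  | n+1, par, x =>
    match par.get? x with
    | none => x
    | some p => if p = x then x else prootN n par p

def proot (par : PySem.Dict String String) (x : String) : String := prootN par.size par x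

def rkv (rank : PySem.Dict String Int) (x : String) : Int := rank.getD x 0

def meas (par : PySem.Dict String String) (rank : PySem.Dict String Int) (x : String) : Nat :=
  (par.keys.filter (fun y => decide (rkv rank x < rkv rank y))).length

structure UFInv (par : PySem.Dict String String) (rank : PySem.Dict String Int) : Prop where
  nodup : par.keys.Nodup
  closed : ∀ x p, par.get? x = some p → p ∈ par.keys
  rankdom : ∀ x, x ∈ par.keys → (rank.get? x).isSome
  rklt : ∀ x p, par.get? x = some p → p ≠ x → rkv rank x < rkv rank p

lemma dict_size_eq {ν : Type} (d : PySem.Dict String ν) : d.size = d.keys.length := by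
  simp [PySem.Dict.size, PySem.Dict.keys]

lemma mem_keys_iff_get? {ν : Type} (d : PySem.Dict String ν) (x : String) :
    x ∈ d.keys ↔ ∃ p, d.get? x = some p := by
  constructor
  · intro h
    cases hg : d.get? x with
    | none => exact absurd h ((PySem.Dict.get?_eq_none_iff_not_mem_keys d x).mp hg)
    | some p => exact ⟨p, rfl⟩
  · rintro ⟨p, hp⟩
    by_contra hmem
    rw [(PySem.Dict.get?_eq_none_iff_not_mem_keys d x).mpr hmem] at hp
    cases hp

lemma meas_lt {par : PySem.Dict String String} {rank : PySem.Dict String Int}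
    (h : UFInv par rank) {x p : String} (hx : par.get? x = some p) (hne : p ≠ x) :
    meas par rank p < meas par rank x := by
  have hlt : rkv rank x < rkv rank p := h.rklt x p hx hne
  apply filter_lt_aux _ _ p
  · intro a _ ha
    simp only [decide_eq_true_eq] at ha ⊢
    omega
  · exact h.closed x p hx
  · simp only [decide_eq_true_eq]; omega
  · simp only [decide_eq_false_iff_not, not_lt]; omega

lemma meas_lt_size {par : PySem.Dict String String} {rank : PySem.Dict String Int}
    (h : UFInv par rank) {x : String} (hx : x ∈ par.keys) :
    meas par rank x < par.size := by
  rw [dict_size_eq]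
  have : par.keys.length = (par.keys.filter (fun _ => true)).length := by simp
  rw [this]
  apply filter_lt_aux _ _ x
  · intro a _ _; rfl
  · exact hx
  · rfl
  · simp only [decide_eq_false_iff_not, not_lt]; omega

lemma prootN_root {par : PySem.Dict String String} {r : String} (hr : par.get? r = some r) :
    ∀ f, prootN f par r = r := by
  intro f; cases f with
  | zero => rfl
  | succ n => simp [prootN, hr]

lemma prootN_notmem {par : PySem.Dict String String} {x : String} (hx : par.get? x = none) :
    ∀ f, prootN f par x = x := by
  intro f; cases f with
  | zero => rfl
  | succ n => simp [prootN, hx]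

lemma proot_notmem {par : PySem.Dict String String} {x : String} (hx : par.get? x = none) :
    proot par x = x := prootN_notmem hx _

lemma prootN_stable {par : PySem.Dict String String} {rank : PySem.Dict String Int}
    (h : UFInv par rank) :
    ∀ (f : Nat) (x : String) (g : Nat), meas par rank x < f → meas par rank x < g →
      prootN f par x = prootN g par x := by
  intro f
  induction f with
  | zero => intro x g hf; omega
  | succ n ih =>
    intro x g hf hg
    cases g with
    | zero => omega
    | succ m =>
      cases hp : par.get? x with
      | none => simp [prootN, hp]
      | some p =>
        by_cases hpe : p = x
        · simp [prootN, hp, hpe]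
        · have hm : meas par rank p < meas par rank x := meas_lt h hp hpe
          simp only [prootN, hp, if_neg hpe]
          exact ih p m (by omega) (by omega)

lemma prootN_spec {par : PySem.Dict String String} {rank : PySem.Dict String Int}
    (h : UFInv par rank) :
    ∀ (fuel : Nat) (x : String), x ∈ par.keys → meas par rank x < fuel →
      par.get? (prootN fuel par x) = some (prootN fuel par x) ∧ prootN fuel par x ∈ par.keys ∧
        (prootN fuel par x = x ∨ rkv rank x < rkv rank (prootN fuel par x)) := by
  intro fuel
  induction fuel with
  | zero => intro x _ hm; omega
  | succ n ih =>
    intro x hx hm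
    obtain ⟨p, hp⟩ := (mem_keys_iff_get? par x).mp hx
    by_cases hpe : p = x
    · subst hpe
      simp only [prootN, hp, if_pos rfl]
      exact ⟨hp, hx, Or.inl rfl⟩
    · have hm2 : meas par rank p < meas par rank x := meas_lt h hp hpe
      have hpk : p ∈ par.keys := h.closed x p hp
      have hih := ih p hpk (by omega)
      have hrk : rkv rank x < rkv rank p := h.rklt x p hp hpe
      simp only [prootN, hp, if_neg hpe]
      refine ⟨hih.1, hih.2.1, Or.inr ?_⟩
      rcases hih.2.2 with h3 | h3
      · rw [h3]; exact hrk
      · omega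

lemma proot_spec {par : PySem.Dict String String} {rank : PySem.Dict String Int}
    (h : UFInv par rank) {x : String} (hx : x ∈ par.keys) :
    par.get? (proot par x) = some (proot par x) ∧ proot par x ∈ par.keys ∧
      (proot par x = x ∨ rkv rank x < rkv rank (proot par x)) :=
  prootN_spec h par.size x hx (meas_lt_size h hx)

lemma proot_step {par : PySem.Dict String String} {rank : PySem.Dict String Int}
    (h : UFInv par rank) {x p : String} (hp : par.get? x = some p) (hne : p ≠ x) :
    proot par x = proot par p := by
  have hx : x ∈ par.keys := (mem_keys_iff_get? par x).mpr ⟨p, hp⟩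
  have hpk : p ∈ par.keys := h.closed x p hp
  have hmx := meas_lt_size h hx
  have hmp := meas_lt h hp hne
  obtain ⟨m, hmsz⟩ : ∃ m, par.size = m + 1 := ⟨par.size - 1, by omega⟩
  have hstep : proot par x = prootN m par p := by
    unfold proot
    rw [hmsz]
    simp only [prootN, hp, if_neg hne]
  rw [hstep]
  unfold proot
  exact prootN_stable h m p par.size (by omega) (by omega)

-- ---------- inserting a pointer to a root ----------
lemma UFInv_insert {par : PySem.Dict String String} {rank : PySem.Dict String Int}
    (h : UFInv par rank) {x r : String} (hx : x ∈ par.keys) (hr : par.get? r = some r)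
    (hrk : rkv rank x < rkv rank r ∨ x = r) :
    UFInv (par.insert x r) rank ∧ (par.insert x r).keys = par.keys := by
  have hrkeys : r ∈ par.keys := (mem_keys_iff_get? par r).mpr ⟨r, hr⟩
  have hkeys : (par.insert x r).keys = par.keys :=
    PySem.Dict.keys_insert_of_contains par r ((PySem.Dict.contains_iff_mem_keys par x).mpr hx)
  refine ⟨⟨?_, ?_, ?_, ?_⟩, hkeys⟩
  · rw [hkeys]; exact h.nodup
  · intro y p hyp
    rw [hkeys]
    rw [PySem.Dict.get?_insert] at hyp
    by_cases hyx : y = x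
    · rw [if_pos hyx] at hyp
      cases hyp
      exact hrkeys
    · rw [if_neg hyx] at hyp
      exact h.closed y p hyp
  · intro y hy
    rw [hkeys] at hy
    exact h.rankdom y hy
  · intro y p hyp hne
    rw [PySem.Dict.get?_insert] at hyp
    by_cases hyx : y = x
    · rw [if_pos hyx] at hyp
      cases hyp
      subst hyx
      rcases hrk with h1 | h1
      · exact h1
      · exact absurd h1.symm hne
    · rw [if_neg hyx] at hyp
      exact h.rklt y p hyp hne

lemma proot_insert {par : PySem.Dict String String} {rank : PySem.Dict String Int}
    (h : UFInv par rank) {x r : String} (hx : x ∈ par.keys) (hr : par.get? r = some r)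
    (hrk : rkv rank x < rkv rank r ∨ x = r)
    (hgood : proot par x = r ∨ par.get? x = some x) :
    ∀ y, proot (par.insert x r) y = if proot par y = proot par x then r else proot par y := by
  obtain ⟨hinv', hkeys⟩ := UFInv_insert h hx hr hrk
  have hget : ∀ z, (par.insert x r).get? z = if z = x then some r else par.get? z :=
    fun z => PySem.Dict.get?_insert par x z r
  have hr' : (par.insert x r).get? r = some r := by
    rw [hget r]
    by_cases hrx : r = x
    · rw [if_pos hrx]
    · rw [if_neg hrx]; exact hr
  have hPx := proot_spec h hx
  suffices H : ∀ n y, meas par rank y = n →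
      proot (par.insert x r) y = if proot par y = proot par x then r else proot par y by
    intro y; exact H _ y rfl
  intro n
  induction n using Nat.strong_induction_on with
  | _ n ih =>
    intro y hny
    by_cases hyk : y ∈ par.keys
    · obtain ⟨q, hq⟩ := (mem_keys_iff_get? par y).mp hyk
      by_cases hyx : y = x
      · rw [hyx, if_pos rfl]
        have hgx : (par.insert x r).get? x = some r := by rw [hget x, if_pos rfl]
        by_cases hrx : r = x
        · rw [hrx] at hgx ⊢
          exact prootN_root hgx _
        · rw [proot_step hinv' hgx hrx]
          exact prootN_root hr' _
      · have hq' : (par.insert x r).get? y = some q := by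
          rw [hget y, if_neg hyx]; exact hq
        by_cases hqy : q = y
        · rw [hqy] at hq hq'
          have hpy : proot par y = y := prootN_root hq _
          by_cases hc : proot par y = proot par x
          · rw [if_pos hc]
            rcases hgood with hg | hg
            · have hry : proot (par.insert x r) y = y := prootN_root hq' _
              rw [hry, ← hg, ← hc, hpy]
            · have hpx : proot par x = x := prootN_root hg _
              rw [hpx, hpy] at hc
              exact absurd hc hyx
          · rw [if_neg hc, hpy]
            exact prootN_root hq' _
        · have hstep' : proot (par.insert x r) y = proot (par.insert x r) q :=
            proot_step hinv' hq' hqy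
          have hstep : proot par y = proot par q := proot_step h hq hqy
          have hm : meas par rank q < n := hny ▸ meas_lt h hq hqy
          have hih := ih (meas par rank q) hm q rfl
          rw [hstep', hstep, hih]
    · have hgy : par.get? y = none := (PySem.Dict.get?_eq_none_iff_not_mem_keys par y).mpr hyk
      have hyx : y ≠ x := fun hxy => hyk (hxy ▸ hx)
      have hgy' : (par.insert x r).get? y = none := by
        rw [hget y, if_neg hyx]; exact hgy
      rw [proot_notmem hgy', proot_notmem hgy]
      have hne2 : ¬ (y = proot par x) := by
        intro hcon
        apply hyk
        rw [hcon]
        exact hPx.2.1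
      rw [if_neg hne2]

lemma UFInv_rank_insert {par : PySem.Dict String String} {rank : PySem.Dict String Int}
    (h : UFInv par rank) {r : String} (hr : par.get? r = some r) {k : Int}
    (hk : rkv rank r ≤ k) : UFInv par (rank.insert r k) := by
  have hrkv : ∀ z, rkv (rank.insert r k) z = if z = r then k else rkv rank z := by
    intro z
    unfold rkv
    rw [PySem.Dict.getD_insert]
  refine ⟨h.nodup, h.closed, ?_, ?_⟩
  · intro y hy
    rw [PySem.Dict.get?_insert]
    by_cases hyr : y = r
    · rw [if_pos hyr]; rfl
    · rw [if_neg hyr]; exact h.rankdom y hy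
  · intro y p hyp hne
    have old := h.rklt y p hyp hne
    rw [hrkv, hrkv]
    by_cases hyr : y = r
    · subst hyr
      rw [hr] at hyp
      cases hyp
      exact absurd rfl hne
    · rw [if_neg hyr]
      by_cases hpr : p = r
      · rw [if_pos hpr]
        subst hpr
        omega
      · rw [if_neg hpr]
        exact old

-- ---------- find / union ----------
lemma ufFind_spec {par : PySem.Dict String String} {rank : PySem.Dict String Int}
    (h : UFInv par rank) :
    ∀ (fuel : Nat) (x : String), x ∈ par.keys → meas par rank x < fuel →
    ∃ par', ufFind fuel par x = some (proot par x, par') ∧ par'.keys = par.keys ∧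
      UFInv par' rank ∧ ∀ y, proot par' y = proot par y := by
  intro fuel
  induction fuel with
  | zero => intro x _ hm; omega
  | succ n ih =>
    intro x hx hm
    obtain ⟨p, hp⟩ := (mem_keys_iff_get? par x).mp hx
    by_cases hpe : p = x
    · rw [hpe] at hp
      have hpx : proot par x = x := prootN_root hp _
      refine ⟨par, ?_, rfl, h, fun y => rfl⟩
      simp only [ufFind, hp, hpx, if_true]
    · have hpk : p ∈ par.keys := h.closed x p hp
      have hmp : meas par rank p < n := by
        have := meas_lt h hp hpe
        omega
      obtain ⟨par1, hfind, hkeys1, hinv1, hpr1⟩ := ih p hpk hmp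
      have hxpx : proot par x = proot par p := proot_step h hp hpe
      have hx1 : x ∈ par1.keys := hkeys1 ▸ hx
      have hroot1 : par1.get? (proot par1 x) = some (proot par1 x) := (proot_spec hinv1 hx1).1
      have hRx : proot par1 x = proot par x := hpr1 x
      have hrk1 : rkv rank x < rkv rank (proot par1 x) ∨ x = proot par1 x := by
        rcases (proot_spec hinv1 hx1).2.2 with h1 | h1
        · exact Or.inr h1.symm
        · exact Or.inl h1
      obtain ⟨hinv2, hkeys2⟩ := UFInv_insert hinv1 hx1 hroot1 hrk1
      have hproots := proot_insert hinv1 hx1 hroot1 hrk1 (Or.inl rfl)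
      refine ⟨par1.insert x (proot par x), ?_, ?_, ?_, ?_⟩
      · simp only [ufFind, hp, if_neg hpe, hfind]
        rw [hxpx]
      · rw [hRx] at hkeys2
        rw [hkeys2]
        exact hkeys1
      · rw [hRx] at hinv2
        exact hinv2
      · intro y
        have hpy := hproots y
        rw [hRx] at hpy
        rw [hpy]
        by_cases hc : proot par1 y = proot par x
        · rw [if_pos hc, ← hc, hpr1]
        · rw [if_neg hc, hpr1]

lemma collapse_ker {ra rb fy fz : String} (hne : ra ≠ rb) :
    ((if fy = rb then ra else fy) = (if fz = rb then ra else fz)) ↔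
      (fy = fz ∨ (fy = ra ∧ fz = rb) ∨ (fy = rb ∧ fz = ra)) := by
  by_cases h1 : fy = rb <;> by_cases h2 : fz = rb <;> simp_all <;> tauto

lemma ufUnion_spec {par : PySem.Dict String String} {rank : PySem.Dict String Int}
    (h : UFInv par rank) {x1 x2 : String} (h1 : x1 ∈ par.keys) (h2 : x2 ∈ par.keys) :
    ∃ par' rank', ufUnion par rank x1 x2 = some (par', rank') ∧ par'.keys = par.keys ∧
      UFInv par' rank' ∧
      ∀ y z, (proot par' y = proot par' z ↔
        (proot par y = proot par z ∨
         (proot par y = proot par x1 ∧ proot par z = proot par x2) ∨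
         (proot par y = proot par x2 ∧ proot par z = proot par x1))) := by
  obtain ⟨par1, hfind1, hkeys1, hinv1, hpr1⟩ :=
    ufFind_spec h (par.size + 1) x1 h1 (by have := meas_lt_size h h1; omega)
  have hx2' : x2 ∈ par1.keys := hkeys1 ▸ h2
  obtain ⟨par2, hfind2, hkeys2, hinv2, hpr2⟩ :=
    ufFind_spec hinv1 (par1.size + 1) x2 hx2'
      (by have := meas_lt_size hinv1 hx2'; omega)
  have hr2eq : proot par1 x2 = proot par x2 := hpr1 x2
  set r1 := proot par x1 with hr1def
  set r2 := proot par x2 with hr2def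
  have hkeys12 : par2.keys = par.keys := by rw [hkeys2, hkeys1]
  have hpr12 : ∀ y, proot par2 y = proot par y := fun y => (hpr2 y).trans (hpr1 y)
  have hr1mem : r1 ∈ par.keys := (proot_spec h h1).2.1
  have hr2mem : r2 ∈ par.keys := (proot_spec h h2).2.1
  have hg1 : par2.get? r1 = some r1 := by
    have hh := (proot_spec hinv2 (show x1 ∈ par2.keys from hkeys12 ▸ h1)).1
    rw [hpr12 x1] at hh
    exact hh
  have hg2 : par2.get? r2 = some r2 := by
    have hh := (proot_spec hinv2 (show x2 ∈ par2.keys from hkeys12 ▸ h2)).1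
    rw [hpr12 x2] at hh
    exact hh
  by_cases hrr : r1 ≠ r2
  · obtain ⟨k1, hk1⟩ := Option.isSome_iff_exists.mp (h.rankdom r1 hr1mem)
    obtain ⟨k2, hk2⟩ := Option.isSome_iff_exists.mp (h.rankdom r2 hr2mem)
    have hrk1 : rkv rank r1 = k1 := PySem.Dict.getD_of_get?_eq_some rank 0 hk1
    have hrk2 : rkv rank r2 = k2 := PySem.Dict.getD_of_get?_eq_some rank 0 hk2
    have hcomp : ufUnion par rank x1 x2 =
        (if k1 > k2 then some (par2.insert r2 r1, rank)
         else if k1 < k2 then some (par2.insert r1 r2, rank)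
         else some (par2.insert r2 r1, rank.insert r1 (k1 + 1))) := by
      simp only [ufUnion, hfind1, hfind2, hr2eq]
      rw [if_pos hrr]
      simp only [hk1, hk2]
    have buildA : ∀ (rk' : PySem.Dict String Int), UFInv par2 rk' → rkv rk' r2 < rkv rk' r1 →
        UFInv (par2.insert r2 r1) rk' ∧ (par2.insert r2 r1).keys = par.keys ∧
        ∀ y, proot (par2.insert r2 r1) y = if proot par y = r2 then r1 else proot par y := by
      intro rk' hinv' hlt
      have hmem2 : r2 ∈ par2.keys := hkeys12 ▸ hr2mem
      obtain ⟨hia, hka⟩ := UFInv_insert hinv' hmem2 hg1 (Or.inl hlt)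
      refine ⟨hia, by rw [hka, hkeys12], ?_⟩
      intro y
      have hfor := proot_insert hinv' hmem2 hg1 (Or.inl hlt) (Or.inr hg2) y
      have hrr2 : proot par2 r2 = r2 := prootN_root hg2 _
      rw [hfor, hrr2, hpr12 y]
    by_cases hgt : k1 > k2
    · obtain ⟨hia, hka, hfor⟩ := buildA rank hinv2 (by rw [hrk1, hrk2]; omega)
      refine ⟨par2.insert r2 r1, rank, by rw [hcomp, if_pos hgt], hka, hia, ?_⟩
      intro y z
      rw [hfor y, hfor z, collapse_ker hrr]
    · by_cases hlt : k1 < k2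
      · have hmem1 : r1 ∈ par2.keys := hkeys12 ▸ hr1mem
        obtain ⟨hia, hka⟩ := UFInv_insert hinv2 hmem1 hg2
          (Or.inl (by rw [hrk1, hrk2]; omega))
        have hfor : ∀ y, proot (par2.insert r1 r2) y =
            if proot par y = r1 then r2 else proot par y := by
          intro y
          have hf := proot_insert hinv2 hmem1 hg2
            (Or.inl (by rw [hrk1, hrk2]; omega)) (Or.inr hg1) y
          have hrr1 : proot par2 r1 = r1 := prootN_root hg1 _
          rw [hf, hrr1, hpr12 y]
        refine ⟨par2.insert r1 r2, rank, ?_, by rw [hka, hkeys12], hia, ?_⟩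
        · rw [hcomp, if_neg hgt, if_pos hlt]
        · intro y z
          rw [hfor y, hfor z, collapse_ker (Ne.symm hrr)]
          tauto
      · have hinvR : UFInv par2 (rank.insert r1 (k1 + 1)) :=
          UFInv_rank_insert hinv2 hg1 (by rw [hrk1]; omega)
        have hlt' : rkv (rank.insert r1 (k1 + 1)) r2 < rkv (rank.insert r1 (k1 + 1)) r1 := by
          unfold rkv
          rw [PySem.Dict.getD_insert, PySem.Dict.getD_insert]
          rw [if_neg (Ne.symm hrr), if_pos rfl]
          have : rank.getD r2 0 = k2 := hrk2
          omega
        obtain ⟨hia, hka, hfor⟩ := buildA (rank.insert r1 (k1 + 1)) hinvR hlt'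
        refine ⟨par2.insert r2 r1, rank.insert r1 (k1 + 1), ?_, hka, hia, ?_⟩
        · rw [hcomp, if_neg hgt, if_neg hlt]
        · intro y z
          rw [hfor y, hfor z, collapse_ker hrr]
  · have hreq : r1 = r2 := not_not.mp hrr
    refine ⟨par2, rank, ?_, hkeys12, hinv2, ?_⟩
    · simp only [ufUnion, hfind1, hfind2, hr2eq]
      rw [if_neg hrr]
    · intro y z
      rw [hpr12 y, hpr12 z]
      constructor
      · exact Or.inl
      · rintro (hh | ⟨ha, hb⟩ | ⟨ha, hb⟩)
        · exact hh
        · rw [ha, hb, hreq]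
        · rw [ha, hb, hreq]

-- ---------- joint invariant with B's label map ----------
def labD (lab : PySem.Dict String String) (x : String) : String := lab.getD x x

structure JInv (par : PySem.Dict String String) (rank : PySem.Dict String Int)
    (lab : PySem.Dict String String) : Prop where
  uf : UFInv par rank
  keq : lab.keys = par.keys
  vals : ∀ x, x ∈ par.keys → ∃ v, lab.get? x = some v ∧ v ∈ par.keys
  ker : ∀ x, x ∈ par.keys → ∀ y, y ∈ par.keys →
    (proot par x = proot par y ↔ labD lab x = labD lab y)

lemma relabel_get? (a b : String) :
    ∀ (l : List (String × String)) (z : String),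
      (PySem.Dict.mk (l.map fun kv => (kv.1, if kv.2 = b then a else kv.2))).get? z
        = ((PySem.Dict.mk l).get? z).map (fun v => if v = b then a else v) := by
  intro l
  induction l with
  | nil => intro z; simp [PySem.Dict.get?]
  | cons kv rest ih =>
    intro z
    simp only [List.map_cons]
    rw [PySem.Dict.get?_mk_cons, PySem.Dict.get?_mk_cons]
    by_cases hz : (kv.1 == z) = true
    · rw [if_pos hz, if_pos hz]
      simp
    · rw [if_neg hz, if_neg hz, ih z]

lemma relabel_keys (a b : String) (l : List (String × String)) :
    (PySem.Dict.mk (l.map fun kv => (kv.1, if kv.2 = b then a else kv.2))).keys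
      = (PySem.Dict.mk l).keys := by
  simp [PySem.Dict.keys]

-- ---------- add step ----------
lemma JInv_labD_mem {par : PySem.Dict String String} {rank : PySem.Dict String Int}
    {lab : PySem.Dict String String} (h : JInv par rank lab) :
    ∀ z, z ∈ par.keys → labD lab z ∈ par.keys := by
  intro z hz
  obtain ⟨v, hv, hvk⟩ := h.vals z hz
  unfold labD
  rw [PySem.Dict.getD_of_get?_eq_some lab z hv]
  exact hvk

lemma UFInv_add_fresh {par : PySem.Dict String String} {rank : PySem.Dict String Int}
    (h : UFInv par rank) {x : String} (hx : x ∉ par.keys) :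
    UFInv (par.insert x x) (rank.insert x 0) ∧
      (par.insert x x).keys = par.keys ++ [x] := by
  have hc : par.contains x = false := by
    rw [PySem.Dict.contains_eq_decide_mem_keys]
    simp [hx]
  have hkeys : (par.insert x x).keys = par.keys ++ [x] :=
    PySem.Dict.keys_insert_of_not_contains par x hc
  refine ⟨⟨?_, ?_, ?_, ?_⟩, hkeys⟩
  · rw [hkeys]
    rw [List.nodup_append]
    refine ⟨h.nodup, List.nodup_singleton x, ?_⟩
    intro a ha b hb
    simp only [List.mem_singleton] at hb
    subst hb
    intro hax
    exact hx (hax ▸ ha)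
  · intro y p hyp
    rw [hkeys]
    rw [PySem.Dict.get?_insert] at hyp
    by_cases hyx : y = x
    · rw [if_pos hyx] at hyp
      cases hyp
      exact List.mem_append_right _ (List.mem_singleton.mpr rfl)
    · rw [if_neg hyx] at hyp
      exact List.mem_append_left _ (h.closed y p hyp)
  · intro y hy
    rw [hkeys] at hy
    rw [PySem.Dict.get?_insert]
    by_cases hyx : y = x
    · rw [if_pos hyx]; rfl
    · rw [if_neg hyx]
      rcases List.mem_append.mp hy with h1 | h1
      · exact h.rankdom y h1
      · simp only [List.mem_singleton] at h1
        exact absurd h1 hyx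
  · intro y p hyp hne
    rw [PySem.Dict.get?_insert] at hyp
    by_cases hyx : y = x
    · rw [if_pos hyx] at hyp
      cases hyp
      exact absurd hyx.symm hne
    · rw [if_neg hyx] at hyp
      have hpk : p ∈ par.keys := h.closed y p hyp
      have hpx : p ≠ x := fun hpx => hx (hpx ▸ hpk)
      unfold rkv
      rw [PySem.Dict.getD_insert, PySem.Dict.getD_insert, if_neg hyx, if_neg hpx]
      exact h.rklt y p hyp hne

lemma proot_add_fresh {par : PySem.Dict String String} {rank : PySem.Dict String Int}
    (h : UFInv par rank) {x : String} (hx : x ∉ par.keys) :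
    ∀ y, proot (par.insert x x) y = if y = x then x else proot par y := by
  obtain ⟨hinv', hkeys⟩ := UFInv_add_fresh h hx
  have hget : ∀ z, (par.insert x x).get? z = if z = x then some x else par.get? z :=
    fun z => PySem.Dict.get?_insert par x z x
  have hgx : (par.insert x x).get? x = some x := by rw [hget x, if_pos rfl]
  suffices H : ∀ n y, meas par rank y = n →
      proot (par.insert x x) y = if y = x then x else proot par y by
    intro y; exact H _ y rfl
  intro n
  induction n using Nat.strong_induction_on with
  | _ n ih =>
    intro y hny
    by_cases hyx : y = x
    · rw [hyx, if_pos rfl]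
      exact prootN_root hgx _
    · rw [if_neg hyx]
      by_cases hyk : y ∈ par.keys
      · obtain ⟨q, hq⟩ := (mem_keys_iff_get? par y).mp hyk
        have hq' : (par.insert x x).get? y = some q := by
          rw [hget y, if_neg hyx]; exact hq
        by_cases hqy : q = y
        · rw [hqy] at hq hq'
          have e1 : proot (par.insert x x) y = y := prootN_root hq' _
          have e2 : proot par y = y := prootN_root hq _
          rw [e1, e2]
        · have hqk : q ∈ par.keys := h.closed y q hq
          have hqx : q ≠ x := fun hh => hx (hh ▸ hqk)
          have hstep' := proot_step hinv' hq' hqy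
          have hstep := proot_step h hq hqy
          have hm : meas par rank q < n := hny ▸ meas_lt h hq hqy
          have hih := ih (meas par rank q) hm q rfl
          rw [if_neg hqx] at hih
          rw [hstep', hstep, hih]
      · have hgy : par.get? y = none := (PySem.Dict.get?_eq_none_iff_not_mem_keys par y).mpr hyk
        have hgy' : (par.insert x x).get? y = none := by
          rw [hget y, if_neg hyx]; exact hgy
        rw [proot_notmem hgy', proot_notmem hgy]

lemma jadd_step {par : PySem.Dict String String} {rank : PySem.Dict String Int}
    {lab : PySem.Dict String String} (h : JInv par rank lab) (x : String) :
    JInv (ufAdd par rank x).1 (ufAdd par rank x).2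
        (if lab.contains x then lab else lab.insert x x) ∧
      (∀ z, z ∈ par.keys → z ∈ (ufAdd par rank x).1.keys) ∧
      x ∈ (ufAdd par rank x).1.keys := by
  have hceq : lab.contains x = par.contains x := by
    rw [PySem.Dict.contains_eq_decide_mem_keys, PySem.Dict.contains_eq_decide_mem_keys, h.keq]
  by_cases hc : par.contains x = true
  · have hmem : x ∈ par.keys := (PySem.Dict.contains_iff_mem_keys par x).mp hc
    have hA : ufAdd par rank x = (par, rank) := by unfold ufAdd; rw [if_pos hc]
    rw [hA, hceq, if_pos hc]
    exact ⟨h, fun z hz => hz, hmem⟩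
  · have hc' : par.contains x = false := by simpa using hc
    have hx : x ∉ par.keys := by
      intro hmem
      exact hc ((PySem.Dict.contains_iff_mem_keys par x).mpr hmem)
    have hA : ufAdd par rank x = (par.insert x x, rank.insert x 0) := by
      unfold ufAdd; rw [if_neg hc]
    have hlc : lab.contains x = false := by rw [hceq]; exact hc'
    rw [hA, hceq, if_neg hc]
    obtain ⟨hinv', hkeys⟩ := UFInv_add_fresh h.uf hx
    have hfor := proot_add_fresh h.uf hx
    have hlabkeys : (lab.insert x x).keys = lab.keys ++ [x] :=
      PySem.Dict.keys_insert_of_not_contains lab x hlc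
    have hxmem : x ∈ (par.insert x x).keys := by
      rw [hkeys]
      exact List.mem_append_right _ (List.mem_singleton.mpr rfl)
    have hgetl : ∀ z, (lab.insert x x).get? z = if z = x then some x else lab.get? z :=
      fun z => PySem.Dict.get?_insert lab x z x
    have hlabD : ∀ z, z ≠ x → labD (lab.insert x x) z = labD lab z := by
      intro z hz
      unfold labD
      rw [PySem.Dict.getD_insert, if_neg hz]
    have hlabDx : labD (lab.insert x x) x = x := by
      unfold labD
      rw [PySem.Dict.getD_insert, if_pos rfl]
    have hmemne : ∀ z, z ∈ par.keys → z ≠ x := fun z hz hzx => hx (hzx ▸ hz)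
    refine ⟨⟨hinv', ?_, ?_, ?_⟩, ?_, hxmem⟩
    · rw [hlabkeys, hkeys, h.keq]
    · intro z hz
      rw [hkeys] at hz
      rcases List.mem_append.mp hz with h1 | h1
      · obtain ⟨v, hv, hvk⟩ := h.vals z h1
        refine ⟨v, ?_, ?_⟩
        · rw [hgetl z, if_neg (hmemne z h1)]
          exact hv
        · rw [hkeys]
          exact List.mem_append_left _ hvk
      · simp only [List.mem_singleton] at h1
        refine ⟨x, ?_, hxmem⟩
        rw [h1, hgetl x, if_pos rfl]
    · intro z hz w hw
      rw [hkeys] at hz hw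
      rw [hfor z, hfor w]
      rcases List.mem_append.mp hz with h1 | h1
      · have hz' := hmemne z h1
        rw [if_neg hz', hlabD z hz']
        rcases List.mem_append.mp hw with h2 | h2
        · have hw' := hmemne w h2
          rw [if_neg hw', hlabD w hw']
          exact h.ker z h1 w h2
        · simp only [List.mem_singleton] at h2
          rw [h2, if_pos rfl, hlabDx]
          constructor
          · intro hcon
            exact absurd (proot_spec h.uf h1).2.1 (by rw [hcon]; exact hx)
          · intro hcon
            exact absurd (JInv_labD_mem h z h1) (by rw [hcon]; exact hx)
      · simp only [List.mem_singleton] at h1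
        rw [h1, if_pos rfl, hlabDx]
        rcases List.mem_append.mp hw with h2 | h2
        · have hw' := hmemne w h2
          rw [if_neg hw', hlabD w hw']
          constructor
          · intro hcon
            exact absurd (proot_spec h.uf h2).2.1 (by rw [← hcon]; exact hx)
          · intro hcon
            exact absurd (JInv_labD_mem h w h2) (by rw [← hcon]; exact hx)
        · simp only [List.mem_singleton] at h2
          rw [h2, if_pos rfl, hlabDx]
    · intro z hz
      rw [hkeys]
      exact List.mem_append_left _ hz

lemma jadd_fold :
    ∀ (ids : List String) (par : PySem.Dict String String) (rank : PySem.Dict String Int)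
      (lab : PySem.Dict String String), JInv par rank lab →
    JInv (ids.foldl (fun (pr : PySem.Dict String String × PySem.Dict String Int) z =>
            ufAdd pr.1 pr.2 z) (par, rank)).1
        (ids.foldl (fun (pr : PySem.Dict String String × PySem.Dict String Int) z =>
            ufAdd pr.1 pr.2 z) (par, rank)).2
        (ids.foldl (fun lb z => if lb.contains z then lb else lb.insert z z) lab) ∧
      (∀ z, z ∈ par.keys → z ∈ (ids.foldl (fun (pr : PySem.Dict String String × PySem.Dict String Int) z =>
            ufAdd pr.1 pr.2 z) (par, rank)).1.keys) ∧
      (∀ z, z ∈ ids → z ∈ (ids.foldl (fun (pr : PySem.Dict String String × PySem.Dict String Int) z =>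
            ufAdd pr.1 pr.2 z) (par, rank)).1.keys) := by
  intro ids
  induction ids with
  | nil =>
    intro par rank lab h
    exact ⟨h, fun z hz => hz, fun z hz => by simp at hz⟩
  | cons x ids ih =>
    intro par rank lab h
    obtain ⟨h1, h2, h3⟩ := jadd_step h x
    simp only [List.foldl_cons]
    obtain ⟨ih1, ih2, ih3⟩ := ih (ufAdd par rank x).1 (ufAdd par rank x).2
      (if lab.contains x then lab else lab.insert x x) h1
    refine ⟨?_, ?_, ?_⟩
    · exact ih1
    · intro z hz
      exact ih2 z (h2 z hz)
    · intro z hz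
      rcases List.mem_cons.mp hz with hzx | hzm
      · exact hzx ▸ ih2 x h3
      · exact ih3 z hzm

-- ---------- union step (joint with relabeling) ----------
lemma junion_step {par : PySem.Dict String String} {rank : PySem.Dict String Int}
    {lab : PySem.Dict String String} (h : JInv par rank lab) {x0 y a : String}
    (hx0 : x0 ∈ par.keys) (hy : y ∈ par.keys) (ha : labD lab x0 = a) :
    ∃ par' rank', ufUnion par rank x0 y = some (par', rank') ∧ par'.keys = par.keys ∧
      JInv par' rank'
        (if labD lab y ≠ a then
          PySem.Dict.mk (lab.items.map (fun kv => (kv.1, if kv.2 = labD lab y then a else kv.2)))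
         else lab) ∧
      labD (if labD lab y ≠ a then
          PySem.Dict.mk (lab.items.map (fun kv => (kv.1, if kv.2 = labD lab y then a else kv.2)))
         else lab) x0 = a := by
  obtain ⟨par', rank', hcomp, hkeys, hinv, hker⟩ := ufUnion_spec h.uf hx0 hy
  by_cases hba : labD lab y = a
  · rw [if_neg (not_not_intro hba)]
    refine ⟨par', rank', hcomp, hkeys, ⟨hinv, ?_, ?_, ?_⟩, ha⟩
    · rw [h.keq, hkeys]
    · intro z hz
      rw [hkeys] at hz
      obtain ⟨v, hv, hvk⟩ := h.vals z hz
      exact ⟨v, hv, by rw [hkeys]; exact hvk⟩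
    · intro z hz w hw
      rw [hkeys] at hz hw
      rw [hker z w]
      have hkzw := h.ker z hz w hw
      have hkzx := h.ker z hz x0 hx0
      have hkzy := h.ker z hz y hy
      have hkwx := h.ker w hw x0 hx0
      have hkwy := h.ker w hw y hy
      constructor
      · rintro (hh | ⟨h1, h2⟩ | ⟨h1, h2⟩)
        · exact hkzw.mp hh
        · rw [hkzx.mp h1, hkwy.mp h2, ha, hba]
        · rw [hkzy.mp h1, hkwx.mp h2, ha, hba]
      · intro hh
        exact Or.inl (hkzw.mpr hh)
  · rw [if_pos hba]
    set b := labD lab y with hbdef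
    have hab : a ≠ b := fun hh => hba hh.symm
    have hget' : ∀ z, (PySem.Dict.mk (lab.items.map
        (fun kv => (kv.1, if kv.2 = b then a else kv.2)))).get? z
        = (lab.get? z).map (fun v => if v = b then a else v) :=
      fun z => relabel_get? a b lab.items z
    have hkeysl : (PySem.Dict.mk (lab.items.map
        (fun kv => (kv.1, if kv.2 = b then a else kv.2)))).keys = lab.keys :=
      relabel_keys a b lab.items
    have hlabD : ∀ z, z ∈ par.keys → labD (PySem.Dict.mk (lab.items.map
        (fun kv => (kv.1, if kv.2 = b then a else kv.2)))) z
        = if labD lab z = b then a else labD lab z := by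
      intro z hz
      obtain ⟨v, hv, hvk⟩ := h.vals z hz
      have hD : lab.getD z z = v := PySem.Dict.getD_of_get?_eq_some lab z hv
      unfold labD
      rw [PySem.Dict.getD_eq_get?_getD, hget' z, hv]
      simp only [Option.map_some, Option.getD_some, hD]
    have hamem : a ∈ par.keys := ha ▸ JInv_labD_mem h x0 hx0
    refine ⟨par', rank', hcomp, hkeys, ⟨hinv, ?_, ?_, ?_⟩, ?_⟩
    · rw [hkeysl, h.keq, hkeys]
    · intro z hz
      rw [hkeys] at hz
      obtain ⟨v, hv, hvk⟩ := h.vals z hz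
      refine ⟨if v = b then a else v, ?_, ?_⟩
      · rw [hget' z, hv]
        rfl
      · by_cases hvb : v = b
        · rw [if_pos hvb, hkeys]
          exact hamem
        · rw [if_neg hvb, hkeys]
          exact hvk
    · intro z hz w hw
      rw [hkeys] at hz hw
      rw [hker z w, hlabD z hz, hlabD w hw, collapse_ker hab]
      have m0 := h.ker z hz w hw
      have m1 := h.ker z hz x0 hx0
      have m2 := h.ker z hz y hy
      have m3 := h.ker w hw x0 hx0
      have m4 := h.ker w hw y hy
      rw [ha] at m1 m3
      constructor
      · rintro (hh | ⟨h1, h2⟩ | ⟨h1, h2⟩)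
        · exact Or.inl (m0.mp hh)
        · exact Or.inr (Or.inl ⟨m1.mp h1, m4.mp h2⟩)
        · exact Or.inr (Or.inr ⟨m2.mp h1, m3.mp h2⟩)
      · rintro (hh | ⟨h1, h2⟩ | ⟨h1, h2⟩)
        · exact Or.inl (m0.mpr hh)
        · exact Or.inr (Or.inl ⟨m1.mpr h1, m4.mpr h2⟩)
        · exact Or.inr (Or.inr ⟨m2.mpr h1, m3.mpr h2⟩)
    · rw [hlabD x0 hx0, ha]
      by_cases hh : a = b
      · rw [if_pos hh]
      · rw [if_neg hh]

lemma junion_fold {x0 a : String} :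
    ∀ (rest : List String) (par : PySem.Dict String String) (rank : PySem.Dict String Int)
      (lab : PySem.Dict String String), JInv par rank lab → x0 ∈ par.keys →
      labD lab x0 = a → (∀ z, z ∈ rest → z ∈ par.keys) →
    ∃ par' rank',
      (rest.foldl (fun st y => match st with
          | none => none
          | some (pr : PySem.Dict String String × PySem.Dict String Int) =>
              ufUnion pr.1 pr.2 x0 y) (some (par, rank))) = some (par', rank') ∧
      par'.keys = par.keys ∧
      JInv par' rank'
        (rest.foldl (fun lb y =>
          let b := lb.getD y y
          if b ≠ a then PySem.Dict.mk (lb.items.map (fun kv => (kv.1, if kv.2 = b then a else kv.2)))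
          else lb) lab) := by
  intro rest
  induction rest with
  | nil =>
    intro par rank lab h hx0 ha hsub
    exact ⟨par, rank, rfl, rfl, h⟩
  | cons y rest ih =>
    intro par rank lab h hx0 ha hsub
    have hy : y ∈ par.keys := hsub y (List.mem_cons_self ..)
    obtain ⟨par1, rank1, hcomp, hkeys, hinv1, hlab1⟩ := junion_step h hx0 hy ha
    simp only [List.foldl_cons]
    rw [hcomp]
    obtain ⟨par2, rank2, hc2, hk2, hi2⟩ := ih par1 rank1
      (if labD lab y ≠ a then
        PySem.Dict.mk (lab.items.map (fun kv => (kv.1, if kv.2 = labD lab y then a else kv.2)))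
       else lab) hinv1 (by rw [hkeys]; exact hx0) hlab1
      (fun z hz => by rw [hkeys]; exact hsub z (List.mem_cons_of_mem _ hz))
    exact ⟨par2, rank2, hc2, by rw [hk2, hkeys], hi2⟩

-- ---------- pyRange index fold = structural fold ----------
lemma fold_pyRange_union (x0 : String) (rest : List String)
    (s : Option (PySem.Dict String String × PySem.Dict String Int)) :
    (PySem.List.pyRange 1 (((x0 :: rest) : List String).length : Int) 1).foldl
      (fun st i => match st with
        | none => none
        | some (parent, rank) =>
          match PySem.List.pyGet? (x0 :: rest) 0, PySem.List.pyGet? (x0 :: rest) i with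
          | some a, some b => ufUnion parent rank a b
          | _, _ => none) s
    = rest.foldl (fun st y => match st with
        | none => none
        | some (pr : PySem.Dict String String × PySem.Dict String Int) =>
            ufUnion pr.1 pr.2 x0 y) s := by
  have h0get : PySem.List.pyGet? (x0 :: rest) 0 = some x0 := by
    have h00 : (0 : Int) = ((0 : Nat) : Int) := rfl
    rw [h00, PySem.List.pyGet?_natCast]
    rfl
  have hcong : ∀ (acc : Option (PySem.Dict String String × PySem.Dict String Int)),
      ∀ i ∈ PySem.List.pyRange 1 (((x0 :: rest) : List String).length : Int) 1,
      (fun st i => match st with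
        | none => none
        | some (parent, rank) =>
          match PySem.List.pyGet? (x0 :: rest) 0, PySem.List.pyGet? (x0 :: rest) i with
          | some a, some b => ufUnion parent rank a b
          | _, _ => none) acc i
      = (fun (st : Option (PySem.Dict String String × PySem.Dict String Int)) i =>
          match st with
          | none => none
          | some (pr : PySem.Dict String String × PySem.Dict String Int) =>
              ufUnion pr.1 pr.2 x0 (PySem.List.pyGetD (x0 :: rest) i "")) acc i := by
    intro acc i hi
    obtain ⟨h1, h2⟩ := PySem.List.mem_pyRange_one.mp hi
    have h0 : 0 ≤ i := by omega
    have htn : i.toNat < (x0 :: rest).length := by omega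
    have hieq : i = ((i.toNat : Nat) : Int) := (Int.toNat_of_nonneg h0).symm
    have hg : PySem.List.pyGet? (x0 :: rest) i = some ((x0 :: rest)[i.toNat]) := by
      have hg0 : PySem.List.pyGet? (x0 :: rest) i = (x0 :: rest)[i.toNat]? := by
        conv_lhs => rw [hieq]
        rw [PySem.List.pyGet?_natCast]
      rw [hg0]
      exact List.getElem?_eq_getElem htn
    have hgd : PySem.List.pyGetD (x0 :: rest) i "" = (x0 :: rest)[i.toNat] :=
      PySem.List.pyGetD_eq_getElem _ _ h0 h2
    cases acc with
    | none => rfl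
    | some pr =>
      obtain ⟨parent, rank⟩ := pr
      simp only [hg, h0get, hgd]
  rw [PySem.List.foldl_congr_mem _ _ _ s hcong]
  exact PySem.List.foldl_pyRange_pyGetD' (x0 :: rest) ""
    (fun st y => match st with
      | none => none
      | some (pr : PySem.Dict String String × PySem.Dict String Int) =>
          ufUnion pr.1 pr.2 x0 y) s (a := 1) (by omega)

lemma JInv_empty : JInv (PySem.Dict.empty : PySem.Dict String String)
    (PySem.Dict.empty : PySem.Dict String Int)
    (PySem.Dict.empty : PySem.Dict String String) := by
  have hk : (PySem.Dict.empty : PySem.Dict String String).keys = [] := rfl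
  refine ⟨⟨?_, ?_, ?_, ?_⟩, ?_, ?_, ?_⟩
  · rw [hk]; exact List.nodup_nil
  · intro x p hp
    rw [PySem.Dict.get?_empty] at hp
    cases hp
  · intro x hx
    rw [hk] at hx
    simp at hx
  · intro x p hp
    rw [PySem.Dict.get?_empty] at hp
    cases hp
  · rfl
  · intro x hx
    rw [hk] at hx
    simp at hx
  · intro x hx
    rw [hk] at hx
    simp at hx

-- ---------- grouping phase ----------
lemma groupIns_eq (k : String) (x : String) (d : PySem.Dict String (PySem.Set String)) :
    ((if d.contains k then d else d.insert k PySem.Set.empty).insert k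
      (PySem.Set.add ((if d.contains k then d else d.insert k PySem.Set.empty).getD k
        PySem.Set.empty) x))
    = d.insert k (PySem.Set.add (d.getD k PySem.Set.empty) x) := by
  by_cases hc : d.contains k = true
  · rw [if_pos hc]
  · have hc' : d.contains k = false := by simpa using hc
    rw [if_neg hc, PySem.Dict.getD_insert_self, PySem.Dict.insert_insert_self,
        PySem.Dict.getD_of_not_contains _ _ hc']

lemma gfoldA {rank : PySem.Dict String Int} (F : String → String) :
    ∀ (ks : List String) (par : PySem.Dict String String)
      (groups : PySem.Dict String (PySem.Set String)),
      UFInv par rank → (∀ z, z ∈ ks → z ∈ par.keys) → (∀ y, proot par y = F y) →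
    ∃ par',
      ks.foldl (fun gst identifier =>
        match gst with
        | none => none
        | some st2 =>
          match ufFind (st2.1.size + 1) st2.1 identifier with
          | none => none
          | some (root, parent') =>
            let groups := if st2.2.contains root then st2.2
                          else st2.2.insert root PySem.Set.empty
            some (parent', groups.insert root
              (PySem.Set.add (groups.getD root PySem.Set.empty) identifier)))
        (some (par, groups))
      = some (par', ks.foldl (fun d x =>
          d.insert (F x) (PySem.Set.add (d.getD (F x) PySem.Set.empty) x)) groups) := by
  intro ks
  induction ks with
  | nil =>
    intro par groups hinv hsub hF
    exact ⟨par, rfl⟩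
  | cons x ks ih =>
    intro par groups hinv hsub hF
    have hx : x ∈ par.keys := hsub x (List.mem_cons_self ..)
    obtain ⟨par1, hfind, hkeys1, hinv1, hpr1⟩ := ufFind_spec hinv (par.size + 1) x hx
      (by have := meas_lt_size hinv hx; omega)
    simp only [List.foldl_cons, hfind]
    rw [hF x, groupIns_eq]
    exact ih par1 _ hinv1
      (fun z hz => by rw [hkeys1]; exact hsub z (List.mem_cons_of_mem _ hz))
      (fun y => (hpr1 y).trans (hF y))

-- first representatives of each class, in order of first appearance
def reps (F : String → String) (ks : List String) : List String :=
  ks.foldl (fun acc x => if acc.any (fun w => F w == F x) then acc else acc ++ [x]) []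

lemma reps_aux_mono (F : String → String) :
    ∀ (ks acc : List String) (w : String), w ∈ acc →
      w ∈ ks.foldl (fun acc x => if acc.any (fun w => F w == F x) then acc else acc ++ [x]) acc := by
  intro ks
  induction ks with
  | nil => intro acc w hw; exact hw
  | cons x xs ih =>
    intro acc w hw
    simp only [List.foldl_cons]
    by_cases h : acc.any (fun w => F w == F x)
    · simp only [h, if_true]; exact ih acc w hw
    · simp only [h, if_false]; exact ih _ w (List.mem_append_left _ hw)

lemma reps_aux_subset (F : String → String) :
    ∀ (ks acc : List String) (w : String),
      w ∈ ks.foldl (fun acc x => if acc.any (fun w => F w == F x) then acc else acc ++ [x]) acc →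
      w ∈ acc ∨ w ∈ ks := by
  intro ks
  induction ks with
  | nil => intro acc w hw; exact Or.inl hw
  | cons x xs ih =>
    intro acc w hw
    simp only [List.foldl_cons] at hw
    by_cases h : acc.any (fun w => F w == F x)
    · simp only [h, if_true] at hw
      rcases ih acc w hw with h1 | h1
      · exact Or.inl h1
      · exact Or.inr (List.mem_cons_of_mem _ h1)
    · simp only [h, if_false] at hw
      rcases ih _ w hw with h1 | h1
      · rcases List.mem_append.mp h1 with h2 | h2
        · exact Or.inl h2
        · simp at h2; subst h2; exact Or.inr (List.mem_cons_self ..)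
      · exact Or.inr (List.mem_cons_of_mem _ h1)

lemma reps_aux_covers (F : String → String) :
    ∀ (ks acc : List String) (z : String), z ∈ ks →
      ∃ w, w ∈ ks.foldl (fun acc x => if acc.any (fun w => F w == F x) then acc else acc ++ [x]) acc ∧
        F w = F z := by
  intro ks
  induction ks with
  | nil => intro acc z hz; cases hz
  | cons x xs ih =>
    intro acc z hz
    simp only [List.foldl_cons]
    rcases List.mem_cons.mp hz with h1 | h1
    · subst h1
      by_cases h : acc.any (fun w => F w == F z)
      · rcases List.any_eq_true.mp h with ⟨w, hw, hwz⟩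
        exact ⟨w, by simp only [h, if_true]; exact reps_aux_mono F xs acc w hw, by simpa using hwz⟩
      · refine ⟨z, ?_, rfl⟩
        simp only [h, if_false]
        exact reps_aux_mono F xs _ z (List.mem_append_right _ (List.mem_singleton.mpr rfl))
    · exact ih _ z h1

lemma reps_aux_nodupF (F : String → String) :
    ∀ (ks acc : List String), (acc.map F).Nodup →
      ((ks.foldl (fun acc x => if acc.any (fun w => F w == F x) then acc else acc ++ [x]) acc).map F).Nodup := by
  intro ks
  induction ks with
  | nil => intro acc h; exact h
  | cons x xs ih =>
    intro acc h
    simp only [List.foldl_cons]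
    by_cases hc : (acc.any (fun w => F w == F x)) = true
    · rw [if_pos hc]; exact ih acc h
    · rw [if_neg hc]
      apply ih
      rw [List.map_append]
      simp only [List.map_cons, List.map_nil]
      apply List.Nodup.append h (List.nodup_singleton _)
      intro v hv hv2
      simp at hv2
      subst hv2
      rcases List.mem_map.mp hv with ⟨w, hw, hwF⟩
      have : acc.any (fun w => F w == F x) = true :=
        List.any_eq_true.mpr ⟨w, hw, by simp [hwF]⟩
      exact absurd this (by simpa using hc)

lemma reps_append (F : String → String) (ks : List String) (x : String) :
    reps F (ks ++ [x]) = if (reps F ks).any (fun w => F w == F x) then reps F ks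
      else reps F ks ++ [x] := by
  unfold reps
  rw [List.foldl_append]
  simp only [List.foldl_cons, List.foldl_nil]

lemma reps_subset (F : String → String) (ks : List String) :
    ∀ w ∈ reps F ks, w ∈ ks := by
  intro w hw
  rcases reps_aux_subset F ks [] w hw with h | h
  · simp at h
  · exact h

lemma reps_nodupF (F : String → String) (ks : List String) : ((reps F ks).map F).Nodup :=
  reps_aux_nodupF F ks [] (by simp)

lemma reps_covers (F : String → String) (ks : List String) :
    ∀ z ∈ ks, ∃ w, w ∈ reps F ks ∧ F w = F z :=
  fun z hz => reps_aux_covers F ks [] z hz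

lemma ofList_append_singleton (l : List String) (x : String) :
    PySem.Set.ofList (l ++ [x]) = PySem.Set.add (PySem.Set.ofList l) x := by
  rw [PySem.Set.ofList_eq_foldl, PySem.Set.ofList_eq_foldl, List.foldl_append]
  simp only [List.foldl_cons, List.foldl_nil]

lemma groupFold_items (F : String → String) :
    ∀ (ks : List String),
      (ks.foldl (fun d x => d.insert (F x) (PySem.Set.add (d.getD (F x) PySem.Set.empty) x))
          (PySem.Dict.empty : PySem.Dict String (PySem.Set String))).items
        = (reps F ks).map (fun w => (F w, PySem.Set.ofList (ks.filter (fun z => F z == F w)))) := by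
  intro ks
  induction ks using List.reverseRecOn with
  | nil => rfl
  | append_singleton ks x ih =>
    rw [List.foldl_append]
    simp only [List.foldl_cons, List.foldl_nil]
    have hkeys : (ks.foldl (fun d x => d.insert (F x)
        (PySem.Set.add (d.getD (F x) PySem.Set.empty) x))
        (PySem.Dict.empty : PySem.Dict String (PySem.Set String))).keys = (reps F ks).map F := by
      show (ks.foldl (fun d x => d.insert (F x)
        (PySem.Set.add (d.getD (F x) PySem.Set.empty) x))
        (PySem.Dict.empty : PySem.Dict String (PySem.Set String))).items.map (·.1) = _
      rw [ih, List.map_map]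
      rfl
    set d := ks.foldl (fun d x => d.insert (F x) (PySem.Set.add (d.getD (F x) PySem.Set.empty) x))
        (PySem.Dict.empty : PySem.Dict String (PySem.Set String)) with hd
    have hnd : d.keys.Nodup := by rw [hkeys]; exact reps_nodupF F ks
    rw [reps_append F ks x]
    by_cases hany : ((reps F ks).any (fun w => F w == F x)) = true
    · rw [if_pos hany]
      obtain ⟨w0, hw0, hw0x⟩ := List.any_eq_true.mp hany
      have hFw0 : F w0 = F x := by simpa using hw0x
      have hc : d.contains (F x) = true := by
        rw [PySem.Dict.contains_eq_decide_mem_keys, hkeys]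
        simp only [decide_eq_true_eq]
        exact List.mem_map.mpr ⟨w0, hw0, hFw0⟩
      have hpair : (F x, PySem.Set.ofList (ks.filter (fun z => F z == F w0))) ∈ d.items := by
        rw [ih]
        exact List.mem_map.mpr ⟨w0, hw0, by rw [hFw0]⟩
      have hgetD : d.getD (F x) PySem.Set.empty
          = PySem.Set.ofList (ks.filter (fun z => F z == F w0)) :=
        PySem.Dict.getD_of_mem_items d hpair hnd _
      rw [PySem.Dict.items_insert_of_contains d _ hc, ih, List.map_map]
      apply List.map_congr_left
      intro w hw
      simp only [Function.comp_apply]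
      split_ifs with hcond
      · have hfw : F w = F x := by simpa using hcond
        have hww0 : w = w0 :=
          List.inj_on_of_nodup_map (reps_nodupF F ks) hw hw0 (hfw.trans hFw0.symm)
        have hbx : (F x == F w) = true := by
          simp only [beq_iff_eq]
          exact hfw.symm
        rw [hgetD, ← hww0, List.filter_append, List.filter_singleton, hbx]
        simp only [Bool.cond_true]
        rw [ofList_append_singleton, hfw]
      · have hfw : ¬ (F w = F x) := by simpa using hcond
        have hbx : (F x == F w) = false := by
          simp only [beq_eq_false_iff_ne, ne_eq]
          exact fun hh => hfw hh.symm
        rw [List.filter_append, List.filter_singleton, hbx]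
        simp only [Bool.cond_false, List.append_nil]
    · rw [if_neg hany]
      have hanyn : ¬ ∃ w ∈ reps F ks, F w = F x := by
        intro ⟨w, hw, hFw⟩
        exact hany (List.any_eq_true.mpr ⟨w, hw, by simp [hFw]⟩)
      have hc : d.contains (F x) = false := by
        rw [PySem.Dict.contains_eq_decide_mem_keys, hkeys]
        simp only [decide_eq_false_iff_not]
        intro hmem
        obtain ⟨w, hw, hFw⟩ := List.mem_map.mp hmem
        exact hanyn ⟨w, hw, hFw⟩
      rw [PySem.Dict.items_insert_of_not_contains d _ hc, ih,
        PySem.Dict.getD_of_not_contains d _ hc, List.map_append]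
      congr 1
      · apply List.map_congr_left
        intro w hw
        have hbx : (F x == F w) = false := by
          simp only [beq_eq_false_iff_ne, ne_eq]
          exact fun hh => hanyn ⟨w, hw, hh.symm⟩
        rw [List.filter_append, List.filter_singleton, hbx]
        simp only [Bool.cond_false, List.append_nil]
      · have hfilter : ks.filter (fun z => F z == F x) = [] := by
          rw [List.filter_eq_nil_iff]
          intro z hz hbeq
          have hFz : F z = F x := by simpa using hbeq
          obtain ⟨w, hw, hFw⟩ := reps_covers F ks z hz
          exact hanyn ⟨w, hw, hFw.trans hFz⟩
        simp only [List.map_cons, List.map_nil]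
        have hbx : (F x == F x) = true := by simp
        rw [List.filter_append, hfilter, List.filter_singleton, hbx]
        simp only [Bool.cond_true, List.nil_append]
        rfl

lemma reps_congr (F G : String → String) (S : List String)
    (hker : ∀ x, x ∈ S → ∀ y, y ∈ S → (F x = F y ↔ G x = G y)) :
    ∀ (ks acc : List String), (∀ w ∈ acc, w ∈ S) → (∀ z ∈ ks, z ∈ S) →
      ks.foldl (fun acc x => if acc.any (fun w => F w == F x) then acc else acc ++ [x]) acc
        = ks.foldl (fun acc x => if acc.any (fun w => G w == G x) then acc else acc ++ [x]) acc := by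
  intro ks
  induction ks with
  | nil => intro acc _ _; rfl
  | cons x xs ih =>
    intro acc hacc hks
    have hx : x ∈ S := hks x (List.mem_cons_self ..)
    have hany : (acc.any (fun w => F w == F x)) = (acc.any (fun w => G w == G x)) := by
      rw [Bool.eq_iff_iff]
      simp only [List.any_eq_true, beq_iff_eq]
      constructor
      · rintro ⟨w, hw, he⟩
        exact ⟨w, hw, (hker w (hacc w hw) x hx).mp he⟩
      · rintro ⟨w, hw, he⟩
        exact ⟨w, hw, (hker w (hacc w hw) x hx).mpr he⟩
    simp only [List.foldl_cons]
    rw [hany]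
    by_cases hc : (acc.any (fun w => G w == G x)) = true
    · rw [if_pos hc]
      exact ih acc hacc (fun z hz => hks z (List.mem_cons_of_mem _ hz))
    · rw [if_neg hc]
      refine ih (acc ++ [x]) ?_ (fun z hz => hks z (List.mem_cons_of_mem _ hz))
      intro w hw
      rcases List.mem_append.mp hw with h1 | h1
      · exact hacc w h1
      · simp only [List.mem_singleton] at h1
        exact h1 ▸ hx

lemma groupFold_values_congr (F G : String → String) (ks : List String)
    (hker : ∀ x, x ∈ ks → ∀ y, y ∈ ks → (F x = F y ↔ G x = G y)) :
    (ks.foldl (fun d x => d.insert (F x) (PySem.Set.add (d.getD (F x) PySem.Set.empty) x))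
        (PySem.Dict.empty : PySem.Dict String (PySem.Set String))).values
      = (ks.foldl (fun d x => d.insert (G x) (PySem.Set.add (d.getD (G x) PySem.Set.empty) x))
        (PySem.Dict.empty : PySem.Dict String (PySem.Set String))).values := by
  have hreps : reps F ks = reps G ks := by
    unfold reps
    exact reps_congr F G ks hker ks [] (by simp) (fun z hz => hz)
  show (ks.foldl (fun d x => d.insert (F x) (PySem.Set.add (d.getD (F x) PySem.Set.empty) x))
        (PySem.Dict.empty : PySem.Dict String (PySem.Set String))).items.map (·.2)
      = (ks.foldl (fun d x => d.insert (G x) (PySem.Set.add (d.getD (G x) PySem.Set.empty) x))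
        (PySem.Dict.empty : PySem.Dict String (PySem.Set String))).items.map (·.2)
  rw [groupFold_items F ks, groupFold_items G ks, hreps, List.map_map, List.map_map]
  apply List.map_congr_left
  intro w hw
  simp only [Function.comp_apply]
  have hwks : w ∈ ks := reps_subset G ks w hw
  congr 1
  apply List.filter_congr
  intro z hz
  rw [Bool.eq_iff_iff]
  simp only [beq_iff_eq]
  exact hker z hz w hwks

-- ---------- phase 1 over the tuple list ----------
lemma phase1 :
    ∀ (ts : List (Int × Int × String × List String × String))
      (par : PySem.Dict String String) (rank : PySem.Dict String Int)
      (lab : PySem.Dict String String), JInv par rank lab →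
    ∃ par' rank',
      (ts.foldl (fun st t =>
        match st with
        | none => none
        | some (parent, rank) =>
          let identifiers := t.2.2.2.1
          let pr := identifiers.foldl (fun (pr : PySem.Dict String String × PySem.Dict String Int)
              identifier => ufAdd pr.1 pr.2 identifier) (parent, rank)
          (PySem.List.pyRange 1 (identifiers.length : Int) 1).foldl (fun st i =>
            match st with
            | none => none
            | some (parent, rank) =>
              match PySem.List.pyGet? identifiers 0, PySem.List.pyGet? identifiers i with
              | some a, some b => ufUnion parent rank a b
              | _, _ => none) (some pr)) (some (par, rank))) = some (par', rank') ∧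
      JInv par' rank'
        (ts.foldl (fun label t =>
          let identifiers := t.2.2.2.1
          let label := identifiers.foldl (fun lab x => if lab.contains x then lab else lab.insert x x) label
          match identifiers with
          | [] => label
          | x0 :: rest =>
            let a := label.getD x0 x0
            rest.foldl (fun lab y =>
              let b := lab.getD y y
              if b ≠ a then
                PySem.Dict.mk (lab.items.map (fun kv => (kv.1, if kv.2 = b then a else kv.2)))
              else lab) label) lab) := by
  intro ts
  induction ts with
  | nil =>
    intro par rank lab h
    exact ⟨par, rank, rfl, h⟩
  | cons t ts ih =>
    intro par rank lab h
    obtain ⟨i0, te, ty, ids, ta⟩ := t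
    obtain ⟨hJ1, hmono, hidsmem⟩ := jadd_fold ids par rank lab h
    simp only [List.foldl_cons]
    cases ids with
    | nil =>
      simp only [List.length_nil, Nat.cast_zero, List.foldl_nil]
      rw [PySem.List.pyRange_one_eq_nil (by omega)]
      simp only [List.foldl_nil]
      exact ih _ _ _ hJ1
    | cons x0 rest =>
      rw [fold_pyRange_union x0 rest]
      rcases hprA : List.foldl
          (fun (pr : PySem.Dict String String × PySem.Dict String Int) identifier =>
            ufAdd pr.1 pr.2 identifier) (par, rank) (x0 :: rest) with ⟨parA, rankA⟩
      simp only [hprA] at hJ1 hmono hidsmem ⊢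
      have hx0A : x0 ∈ parA.keys := hidsmem x0 (List.mem_cons_self ..)
      obtain ⟨parU, rankU, hcompU, hkeysU, hJU⟩ := junion_fold rest parA rankA
        (List.foldl (fun lb z => if lb.contains z then lb else lb.insert z z) lab (x0 :: rest))
        hJ1 hx0A rfl (fun z hz => hidsmem z (List.mem_cons_of_mem _ hz))
      rw [hcompU]
      exact ih parU rankU _ hJU


-- ===== VERDICT (by name: the statement is the Claim_ definition above) =====
theorem group_identifiers_spec : Claim_equal_group_identifiers := by
  unfold Claim_equal_group_identifiers
  intro ts _hdom
  unfold Spec_group_identifiers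
  unfold group_identifiers group_identifiers_alt
  obtain ⟨parF, rankF, hA, hJ⟩ := phase1 ts PySem.Dict.empty PySem.Dict.empty
    PySem.Dict.empty JInv_empty
  simp only [hA]
  obtain ⟨parG, hG⟩ := gfoldA (rank := rankF) (proot parF) parF.keys parF PySem.Dict.empty
    hJ.uf (fun z hz => hz) (fun y => rfl)
  simp only [hG]
  rw [hJ.keq]
  rw [show ∀ (lab2 : PySem.Dict String String),
      (parF.keys.foldl (fun groups x =>
        let l := lab2.getD x x
        let groups := if groups.contains l then groups else groups.insert l PySem.Set.empty
        groups.insert l (PySem.Set.add (groups.getD l PySem.Set.empty) x))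
        (PySem.Dict.empty : PySem.Dict String (PySem.Set String)))
      = (parF.keys.foldl (fun d x => d.insert (labD lab2 x)
          (PySem.Set.add (d.getD (labD lab2 x) PySem.Set.empty) x))
          (PySem.Dict.empty : PySem.Dict String (PySem.Set String)))
    from fun lab2 => PySem.List.foldl_congr_mem _ _ _ _
      (fun acc x _ => groupIns_eq (labD lab2 x) x acc)]
  exact groupFold_values_congr (proot parF) _ parF.keys
    (fun x hx y hy => hJ.ker x hx y hy)
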